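-- pv_equiv track=rewrite | github.com/jmcontreras2/CS2302 | Lab1-Recursion.py | permutations2p2
-- ===== SOURCE A (Python) =====
-- def permutations2p2(unchosenCharacters, chosenCharacters, userWord, prefixSet):
--     if len(unchosenCharacters) == 0:
--         if chosenCharacters != userWord:
--             return [chosenCharacters]
--         else:
--             return []
--     else:
--         ## The recursive case only happens when the permutation in process is length 0 (which means it hasn't started the process)
--         # or the letter we chose for the next permutation pass is already in the permutation in process.
--         permutations = []
--         for i in range(len(unchosenCharacters)):
--             chosenLettertoPass =unchosenCharacters[i]
--             if len(chosenCharacters) == 0: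
--                 unchosenLetterstoPass = unchosenCharacters[:i] + unchosenCharacters[i + 1:]
--                 permutations += (permutations2p2(unchosenLetterstoPass, chosenCharacters + chosenLettertoPass, userWord, prefixSet))
--             elif chosenCharacters in prefixSet:
--                 unchosenLetterstoPass = unchosenCharacters[:i] + unchosenCharacters[i + 1:]
--                 permutations += (permutations2p2(unchosenLetterstoPass, chosenCharacters + chosenLettertoPass, userWord, prefixSet))
--             else:
--                 return []
--         ### We return the final list of anagrams when permutations2p2 is finished.
--         return permutations
-- ===== SOURCE B (Python) =====
-- def permutations2p2(unchosenCharacters, chosenCharacters, userWord, prefixSet):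
--     result = []
--     stack = [(chosenCharacters, unchosenCharacters)]
--     while stack:
--         chosen, unchosen = stack.pop()
--         if not unchosen:
--             if chosen != userWord:
--                 result.append(chosen)
--         elif not chosen or chosen in prefixSet:
--             children = [(chosen + unchosen[i], unchosen[:i] + unchosen[i + 1:])
--                         for i in range(len(unchosen))]
--             stack.extend(reversed(children))
--     return result
-- ===== Notes on version B (the rewrite author's own statement) =====
-- stated objective: alternative
-- what changed: Replaces A's mutual recursion (recursive calls from inside a for-loop, prefix-pruned) by an explicit-stack iterative DFS: frames (chosen, unchosen) are pushed in reverse so they pop in A's left-to-right preorder, and results are collected in pop order.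
import Mathlib
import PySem

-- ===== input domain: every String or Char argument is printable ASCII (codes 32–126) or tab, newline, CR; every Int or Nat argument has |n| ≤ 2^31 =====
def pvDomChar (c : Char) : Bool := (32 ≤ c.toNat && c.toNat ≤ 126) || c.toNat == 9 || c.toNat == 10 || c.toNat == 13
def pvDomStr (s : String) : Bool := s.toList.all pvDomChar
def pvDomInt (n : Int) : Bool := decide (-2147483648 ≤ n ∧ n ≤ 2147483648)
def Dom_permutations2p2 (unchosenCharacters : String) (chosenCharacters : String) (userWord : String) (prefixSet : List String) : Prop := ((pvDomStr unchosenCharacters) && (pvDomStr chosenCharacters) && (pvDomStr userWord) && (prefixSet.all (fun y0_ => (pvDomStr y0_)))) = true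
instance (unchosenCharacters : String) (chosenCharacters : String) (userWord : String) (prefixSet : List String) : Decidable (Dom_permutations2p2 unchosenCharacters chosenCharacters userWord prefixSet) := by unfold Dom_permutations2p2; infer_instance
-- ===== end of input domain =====

-- B replaces A's prefix-pruned recursion by an explicit-stack DFS loop (same return values, no recursion); objective: alternative.
-- Both ports work over List Char (strings decoded at the boundary); A's recursion and B's stack loop are transliterated step for step.

-- ===== PORT A =====
-- u[:i] + u[i+1:] for a Nat index i (exact: Python slice with nonnegative bounds; cited by both ports' proofs)
theorem pvSliceErase_eq (u : List Char) (i : Nat) :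
    PySem.List.slice u none (some (i : Int)) ++ PySem.List.slice u (some ((i : Int) + 1)) none
      = u.take i ++ u.drop (i + 1) := by
  have h1 : ((i : Int) + 1) = ((i + 1 : Nat) : Int) := by push_cast; ring
  rw [PySem.List.slice_to_natCast, h1, PySem.List.slice_from_natCast]

theorem pvSliceErase_length (u : List Char) (i : Nat) (h : i < u.length) :
    (PySem.List.slice u none (some (i : Int)) ++ PySem.List.slice u (some ((i : Int) + 1)) none).length
      = u.length - 1 := by
  rw [pvSliceErase_eq]; simp; omega

mutual
-- body of Python A: base case, else the for-loop (p2LoopA, index i, accumulator `permutations`)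
def p2CoreA (u c w : List Char) (ps : List (List Char)) : List (List Char) :=
  if u.length = 0 then
    if c ≠ w then [c] else []
  else
    p2LoopA u c w ps 0 []
termination_by (u.length, 1, 0)
decreasing_by
  simp_wf
  exact Prod.Lex.right _ (Prod.Lex.left _ _ (by omega))

-- the `for i in range(len(unchosenCharacters))` loop of A, with its early `return []`
def p2LoopA (u c w : List Char) (ps : List (List Char)) (i : Nat) (acc : List (List Char)) : List (List Char) :=
  if h : i < u.length then
    if c.length = 0 then
      p2LoopA u c w ps (i + 1)
        (acc ++ p2CoreA (PySem.List.slice u none (some (i : Int)) ++ PySem.List.slice u (some ((i : Int) + 1)) none) (c ++ [u[i]]) w ps)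
    else if c ∈ ps then
      p2LoopA u c w ps (i + 1)
        (acc ++ p2CoreA (PySem.List.slice u none (some (i : Int)) ++ PySem.List.slice u (some ((i : Int) + 1)) none) (c ++ [u[i]]) w ps)
    else
      []
  else
    acc
termination_by (u.length, 0, u.length - i)
decreasing_by
  all_goals simp_wf
  · refine Prod.Lex.left _ _ ?_
    have h2 := pvSliceErase_length u i h
    simp only [List.length_append, PySem.List.slice_to_natCast, List.length_take] at h2 ⊢
    omega
  · exact Prod.Lex.right _ (Prod.Lex.right _ (by omega))
  · refine Prod.Lex.left _ _ ?_
    have h2 := pvSliceErase_length u i h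
    simp only [List.length_append, PySem.List.slice_to_natCast, List.length_take] at h2 ⊢
    omega
  · exact Prod.Lex.right _ (Prod.Lex.right _ (by omega))
end

def permutations2p2 (unchosenCharacters : String) (chosenCharacters : String) (userWord : String) (prefixSet : List String) : List String :=
  (p2CoreA unchosenCharacters.toList chosenCharacters.toList userWord.toList (prefixSet.map String.toList)).map String.ofList

-- ===== PORT B =====
-- the list comprehension `children = [(chosen + unchosen[i], unchosen[:i] + unchosen[i+1:]) for i in range(len(unchosen))]`
def bChildren (c u : List Char) : List (List Char × List Char) :=
  (PySem.List.pyRange 0 (PySem.List.len u) 1).map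
    (fun i => (c ++ [PySem.List.pyGetD u i ' '],
               PySem.List.slice u none (some i) ++ PySem.List.slice u (some (i + 1)) none))

theorem bChildren_eq (c u : List Char) :
    bChildren c u = (List.range u.length).map (fun i => (c ++ [u.getD i ' '], u.take i ++ u.drop (i + 1))) := by
  unfold bChildren
  rw [PySem.List.len_eq, PySem.List.pyRange_one, List.map_map]
  have hn : ((u.length : Int) - 0).toNat = u.length := by omega
  rw [hn]
  refine List.map_congr_left ?_
  intro k _
  have h0 : ((0 : Int) + (k : Int)) = (k : Int) := by ring
  simp only [Function.comp, h0, PySem.List.pyGetD_natCast, pvSliceErase_eq]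

-- weight of the pushed children, used for bLoop's termination
theorem bChildren_measure (c u : List Char) (h : ¬ u = []) :
    ((bChildren c u).map (fun f => (f.2.length + 1).factorial)).sum < (u.length + 1).factorial := by
  rw [bChildren_eq, List.map_map]
  have hcongr : ∀ k ∈ List.range u.length,
      ((fun f : List Char × List Char => (f.2.length + 1).factorial) ∘
        (fun i => (c ++ [u.getD i ' '], u.take i ++ u.drop (i + 1)))) k = u.length.factorial := by
    intro k hk
    rw [List.mem_range] at hk
    have : (u.take k ++ u.drop (k + 1)).length + 1 = u.length := by simp; omega
    simp only [Function.comp]; rw [this]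
  rw [List.map_congr_left hcongr]
  have hlen : 0 < u.length := List.length_pos_of_ne_nil h
  have hsum : (List.map (fun _ => u.length.factorial) (List.range u.length)).sum
      = u.length * u.length.factorial := by
    rw [List.map_const']; simp [List.sum_replicate]
  rw [hsum, Nat.factorial_succ]
  have := Nat.factorial_pos u.length
  nlinarith

-- the `while stack:` loop of B: head of the Lean list = top of the Python stack
def bLoop (w : List Char) (ps : List (List Char)) (stack : List (List Char × List Char)) (res : List (List Char)) : List (List Char) :=
  match stack with
  | [] => res
  | (c, u) :: rest =>
    if u = [] then
      bLoop w ps rest (if c ≠ w then res ++ [c] else res)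
    else if c = [] ∨ c ∈ ps then
      bLoop w ps (bChildren c u ++ rest) res
    else
      bLoop w ps rest res
termination_by (stack.map (fun f => (f.2.length + 1).factorial)).sum
decreasing_by
  all_goals simp only [List.map_cons, List.map_append, List.sum_cons, List.sum_append]
  · have := Nat.factorial_pos (u.length + 1); omega
  · have := bChildren_measure c u (by assumption); omega
  · have := Nat.factorial_pos (u.length + 1); omega

def permutations2p2_alt (unchosenCharacters : String) (chosenCharacters : String) (userWord : String) (prefixSet : List String) : List String :=
  (bLoop userWord.toList (prefixSet.map String.toList) [(chosenCharacters.toList, unchosenCharacters.toList)] []).map String.ofList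

-- ===== PRECONDITION & SPEC =====
def Spec_permutations2p2 (unchosenCharacters : String) (chosenCharacters : String) (userWord : String) (prefixSet : List String) (out : List String) : Prop := out = permutations2p2_alt unchosenCharacters chosenCharacters userWord prefixSet
instance (unchosenCharacters : String) (chosenCharacters : String) (userWord : String) (prefixSet : List String) (out : List String) : Decidable (Spec_permutations2p2 unchosenCharacters chosenCharacters userWord prefixSet out) := by unfold Spec_permutations2p2; infer_instance

-- ===== CLAIM (what is proved, stated in full; the proofs are below) =====
def Claim_equal_permutations2p2 : Prop := ∀ (unchosenCharacters : String) (chosenCharacters : String) (userWord : String) (prefixSet : List String), Dom_permutations2p2 unchosenCharacters chosenCharacters userWord prefixSet → Spec_permutations2p2 unchosenCharacters chosenCharacters userWord prefixSet (permutations2p2 unchosenCharacters chosenCharacters userWord prefixSet)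

-- ===== LEMMAS AND PROOFS =====

theorem bChildren_length (c u : List Char) : (bChildren c u).length = u.length := by
  rw [bChildren_eq]; simp

theorem bChildren_getElem (c u : List Char) (i : Nat) (h : i < u.length) :
    (bChildren c u)[i]'(by rw [bChildren_length]; exact h)
      = (c ++ [u[i]], u.take i ++ u.drop (i + 1)) := by
  simp [bChildren_eq, List.getD_eq_getElem?_getD, List.getElem?_eq_getElem h]

-- A's for-loop, from index i on, under the non-pruned condition, appends the flattened recursive results
theorem p2LoopA_spec (u c w : List Char) (ps : List (List Char)) (hc : c = [] ∨ c ∈ ps) :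
    ∀ (j i : Nat) (acc : List (List Char)), u.length - i ≤ j →
      p2LoopA u c w ps i acc
        = acc ++ ((bChildren c u).drop i).flatMap (fun f => p2CoreA f.2 f.1 w ps) := by
  intro j
  induction j with
  | zero =>
    intro i acc hij
    have hi : ¬ i < u.length := by omega
    rw [p2LoopA, dif_neg hi]
    rw [List.drop_eq_nil_of_le (by rw [bChildren_length]; omega)]
    simp
  | succ j ihj =>
    intro i acc hij
    by_cases hi : i < u.length
    · rw [p2LoopA, dif_pos hi]
      have hE : ∀ E : List (List Char),
          (if c.length = 0 then E else if c ∈ ps then E else []) = E := by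
        intro E
        rcases hc with h | h
        · rw [if_pos (by simp [h])]
        · by_cases h0 : c.length = 0
          · rw [if_pos h0]
          · rw [if_neg h0, if_pos h]
      rw [hE]
      rw [ihj (i + 1) _ (by omega)]
      have hdrop : (bChildren c u).drop i
          = (c ++ [u[i]], u.take i ++ u.drop (i + 1)) :: (bChildren c u).drop (i + 1) := by
        rw [List.drop_eq_getElem_cons (by rw [bChildren_length]; exact hi)]
        rw [bChildren_getElem c u i hi]
      rw [hdrop, List.flatMap_cons, pvSliceErase_eq]
      simp
    · have hi' : ¬ i < u.length := hi
      rw [p2LoopA, dif_neg hi']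
      rw [List.drop_eq_nil_of_le (by rw [bChildren_length]; omega)]
      simp

-- characterisation of A's recursion as one step over bChildren
theorem p2CoreA_char (u c w : List Char) (ps : List (List Char)) :
    p2CoreA u c w ps
      = if u = [] then (if c ≠ w then [c] else [])
        else if c = [] ∨ c ∈ ps then (bChildren c u).flatMap (fun f => p2CoreA f.2 f.1 w ps)
        else [] := by
  by_cases hu : u = []
  · rw [p2CoreA, if_pos (by simp [hu]), if_pos hu]
  · have hlen : ¬ u.length = 0 := by simpa using hu
    rw [p2CoreA, if_neg hlen, if_neg hu]
    by_cases hc : c = [] ∨ c ∈ ps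
    · rw [p2LoopA_spec u c w ps hc u.length 0 [] (by omega), if_pos hc]
      simp
    · rw [if_neg hc]
      rw [not_or] at hc
      have hpos : 0 < u.length := Nat.pos_of_ne_zero hlen
      rw [p2LoopA, dif_pos hpos, if_neg (by simpa using hc.1), if_neg hc.2]

-- popping a block of frames produces exactly the recursion's results for those frames, in order
theorem bLoop_frames (w : List Char) (ps : List (List Char)) :
    ∀ (k : Nat) (fs : List (List Char × List Char)), (∀ f ∈ fs, f.2.length ≤ k) →
      ∀ (rest : List (List Char × List Char)) (res : List (List Char)),
        bLoop w ps (fs ++ rest) res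
          = bLoop w ps rest (res ++ fs.flatMap (fun f => p2CoreA f.2 f.1 w ps)) := by
  intro k
  induction k with
  | zero =>
    intro fs
    induction fs with
    | nil => intro _ rest res; simp
    | cons f fs ih =>
      intro hall rest res
      obtain ⟨c, u⟩ := f
      have hu : u = [] := by
        have h0 := hall (c, u) (by simp)
        simp only [Nat.le_zero] at h0
        exact List.eq_nil_of_length_eq_zero h0
      rw [List.cons_append, bLoop, if_pos hu]
      rw [ih (fun f hf => hall f (by simp [hf])) rest _]
      rw [List.flatMap_cons, p2CoreA_char]
      by_cases hw : c = w <;> simp [hu, hw]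
  | succ k ihk =>
    intro fs
    induction fs with
    | nil => intro _ rest res; simp
    | cons f fs ih =>
      intro hall rest res
      obtain ⟨c, u⟩ := f
      by_cases hu : u = []
      · rw [List.cons_append, bLoop, if_pos hu]
        rw [ih (fun f hf => hall f (by simp [hf])) rest _]
        rw [List.flatMap_cons, p2CoreA_char]
        by_cases hw : c = w <;> simp [hu, hw]
      · rw [List.cons_append, bLoop, if_neg hu]
        by_cases hc : c = [] ∨ c ∈ ps
        · rw [if_pos hc]
          have hlen : ∀ f ∈ bChildren c u, f.2.length ≤ k := by
            intro f hf
            rw [bChildren_eq] at hf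
            simp only [List.mem_map, List.mem_range] at hf
            obtain ⟨i, hi, rfl⟩ := hf
            have h1 : 0 < u.length := List.length_pos_of_ne_nil hu
            have h2 := hall (c, u) (by simp)
            simp only at h2 ⊢
            simp only [List.length_append, List.length_take, List.length_drop]
            omega
          rw [ihk (bChildren c u) hlen (fs ++ rest) res]
          rw [ih (fun f hf => hall f (by simp [hf])) rest _]
          rw [List.flatMap_cons, p2CoreA_char, if_neg hu, if_pos hc]
          simp
        · rw [if_neg hc]
          rw [ih (fun f hf => hall f (by simp [hf])) rest _]
          rw [List.flatMap_cons, p2CoreA_char, if_neg hu, if_neg hc]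
          simp

-- ===== VERDICT (by name: the statement is the Claim_ definition above) =====
theorem permutations2p2_spec : Claim_equal_permutations2p2 := by
  intro u c w ps _
  unfold Spec_permutations2p2 permutations2p2 permutations2p2_alt
  congr 1
  have h := bLoop_frames w.toList (ps.map String.toList) u.toList.length
    [(c.toList, u.toList)] (by intro f hf; simp at hf; simp [hf]) [] []
  rw [List.append_nil] at h
  rw [h]
  simp [bLoop]
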